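-- pv_equiv track=rewrite | github.com/lefterav/qualitative | src/featuregenerator/rgbf.py | take_ngrams
-- ===== SOURCE A (Python) =====
-- def take_ngrams(line, m):
--     newline = ""
--     words = line.split()
--     for i, word in enumerate(words):
--         for j in range(1, m+1):
--             if i+j <= len(words):
--                 for k in range(i, i+j-1):
--                     newline += words[k] + "=="
--                 newline += words[i+j-1]
--                 if j < m:
--                     newline += "#"
--             if j==m:
--                 newline += " "
--
--     ngram = [[] for x in range(m)]
--
--     newwords = newline.split()
--     for newword in newwords:
--         ngrams = newword.split("#")
--         for nnw, nw in enumerate(ngrams):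
--             if nw != "" and nw !="\n":
--                 ngram[nnw].append(nw)
--
--     return ngram
-- ===== SOURCE B (Python) =====
-- def take_ngrams(line, m):
--     words = line.split()
--     n = len(words)
--     ngram = [[] for _ in range(m)]
--     for i in range(n):
--         gram = ""
--         for j in range(1, min(m, n - i) + 1):
--             gram = words[i] if j == 1 else gram + "==" + words[i + j - 1]
--             ngram[j - 1].append(gram)
--     return ngram
-- ===== Notes on version B (the rewrite author's own statement) =====
-- stated objective: faster
-- what changed: B builds each n-gram incrementally by extending the previous one and appends it directly into its bucket, instead of A's serializing all grams into one '#'/' '-delimited string (re-joining each gram from scratch) and re-splitting/re-parsing that string.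
-- outside the precondition, e.g. on take_ngrams('x# y', 1): A returns [['x', 'y']], B returns [['x#', 'y']]
import Mathlib
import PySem

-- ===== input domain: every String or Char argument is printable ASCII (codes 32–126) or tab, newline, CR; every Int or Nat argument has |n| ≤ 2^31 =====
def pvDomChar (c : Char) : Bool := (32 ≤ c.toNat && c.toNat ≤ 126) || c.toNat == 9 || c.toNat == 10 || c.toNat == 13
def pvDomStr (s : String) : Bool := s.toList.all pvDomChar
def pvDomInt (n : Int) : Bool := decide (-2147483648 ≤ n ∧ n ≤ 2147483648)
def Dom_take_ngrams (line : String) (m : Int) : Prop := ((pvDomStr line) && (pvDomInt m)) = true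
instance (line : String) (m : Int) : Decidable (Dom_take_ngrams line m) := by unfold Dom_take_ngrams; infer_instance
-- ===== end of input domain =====

-- B replaces A's serialize-to-one-string-and-reparse with a direct O(n*m) incremental build of each n-gram (faster; measured by the check).
-- ===== PORT A =====
def take_ngrams (line : String) (m : Int) : List (List String) :=
  let words := PySem.Chars.split₀ line.toList
  let newline : List Char :=
    (PySem.List.enumerate words).foldl (fun nl iw =>
      (PySem.List.pyRange 1 (m + 1)).foldl (fun nl j =>
        let nl :=
          if iw.1 + j ≤ (words.length : Int) then
            let nl := (PySem.List.pyRange iw.1 (iw.1 + j - 1)).foldl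
                (fun nl k => nl ++ PySem.List.pyGetD words k [] ++ ['=', '=']) nl
            let nl := nl ++ PySem.List.pyGetD words (iw.1 + j - 1) []
            if j < m then nl ++ ['#'] else nl
          else nl
        if j == m then nl ++ [' '] else nl) nl) []
  let ngram : List (List String) := List.replicate m.toNat []
  let newwords := PySem.Chars.split₀ newline
  -- ngram[nnw].append(nw): in-range update (Python raises IndexError out of range; Pre_ excludes those inputs)
  newwords.foldl (fun ngram newword =>
    let ngrams := PySem.Chars.splitOn newword ['#']
    (PySem.List.enumerate ngrams).foldl (fun ngram p =>
      if p.2 ≠ [] ∧ p.2 ≠ ['\n'] then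
        ngram.set p.1.toNat (ngram.getD p.1.toNat [] ++ [String.ofList p.2])
      else ngram) ngram) ngram

-- ===== PORT B =====
def take_ngrams_alt (line : String) (m : Int) : List (List String) :=
  let words := PySem.Chars.split₀ line.toList
  let n := words.length
  let init : List (List String) := List.replicate m.toNat []
  (PySem.List.pyRange 0 (n : Int)).foldl (fun ngram i =>
    ((PySem.List.pyRange 1 (min m ((n : Int) - i) + 1)).foldl
      (fun (st : List Char × List (List String)) j =>
        let gram := if j == 1 then PySem.List.pyGetD words i []
                    else st.1 ++ ['=', '='] ++ PySem.List.pyGetD words (i + j - 1) []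
        (gram, st.2.set (j - 1).toNat (st.2.getD (j - 1).toNat [] ++ [String.ofList gram])))
      (([] : List Char), ngram)).2) init

-- ===== PRECONDITION & SPEC =====
-- Pre_ excludes lines containing '#': A serializes the grams into one string using '#' as an internal
-- delimiter, so a '#' inside a word collides with it — A then raises IndexError or misfiles grams.
def Pre_take_ngrams (line : String) (m : Int) : Prop := PySem.Str.isIn "#" line = false
instance (line : String) (m : Int) : Decidable (Pre_take_ngrams line m) := by unfold Pre_take_ngrams; infer_instance
def pvWitness_take_ngrams : String × Int := ("one two three", 2)
def Spec_take_ngrams (line : String) (m : Int) (out : List (List String)) : Prop := out = take_ngrams_alt line m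
instance (line : String) (m : Int) (out : List (List String)) : Decidable (Spec_take_ngrams line m out) := by unfold Spec_take_ngrams; infer_instance

-- ===== CLAIM (what is proved, stated in full; the proofs are below) =====
def Claim_equal_take_ngrams : Prop := ∀ (line : String) (m : Int), Dom_take_ngrams line m → Pre_take_ngrams line m → Spec_take_ngrams line m (take_ngrams line m)

-- ===== LEMMAS AND PROOFS =====
-- ===== split₀ lemmas =====
theorem pvSplit0_go_acc (l : List Char) (cur : List Char) (acc : List (List Char)) :
    PySem.Chars.split₀.go l cur acc = acc.reverse ++ PySem.Chars.split₀.go l cur [] := by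
  induction l generalizing cur acc with
  | nil => simp [PySem.Chars.split₀.go]; split_ifs <;> simp
  | cons c rest ih =>
    simp only [PySem.Chars.split₀.go]
    split_ifs with h1 h2
    · rw [ih [] acc]
    · rw [ih [] (cur.reverse :: acc), ih [] [cur.reverse]]; simp
    · exact ih (c :: cur) acc

theorem pvSplit0_go_nonspace (w : List Char) (l : List Char) (cur : List Char)
    (hw : ∀ c ∈ w, PySem.Chars.isspace c = false) :
    PySem.Chars.split₀.go (w ++ l) cur [] = PySem.Chars.split₀.go l (w.reverse ++ cur) [] := by
  induction w generalizing cur with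
  | nil => simp
  | cons c rest ih =>
    simp only [List.cons_append, PySem.Chars.split₀.go]
    rw [if_neg (by simp [hw c (by simp)])]
    rw [ih (c :: cur) (fun d hd => hw d (by simp [hd]))]
    simp

theorem pvSplit0_cons_word (w : List Char) (rest : List Char)
    (hne : w ≠ []) (hw : ∀ c ∈ w, PySem.Chars.isspace c = false) :
    PySem.Chars.split₀ (w ++ ' ' :: rest) = w :: PySem.Chars.split₀ rest := by
  unfold PySem.Chars.split₀
  rw [pvSplit0_go_nonspace w _ [] hw]
  simp only [PySem.Chars.split₀.go]
  rw [if_pos (by decide)]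
  rw [if_neg (by simpa using hne)]
  rw [pvSplit0_go_acc]
  simp

theorem pvSplit0_nil : PySem.Chars.split₀ [] = [] := rfl

-- words of split₀ are nonempty, whitespace-free, with chars from the source
theorem pvSplit0_go_sound (l : List Char) : ∀ (cur : List Char),
    (∀ c ∈ cur, PySem.Chars.isspace c = false) →
    ∀ w ∈ PySem.Chars.split₀.go l cur [], w ≠ [] ∧ ∀ c ∈ w, (c ∈ cur ∨ c ∈ l) ∧ PySem.Chars.isspace c = false := by
  induction l with
  | nil =>
    intro cur hcur w hw
    simp only [PySem.Chars.split₀.go] at hw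
    split_ifs at hw with h
    · simp at hw
    · simp at hw
      subst hw
      refine ⟨by simpa [List.isEmpty_iff] using h, fun c hc => ⟨Or.inl (by simpa using hc), hcur c (by simpa using hc)⟩⟩
  | cons c rest ih =>
    intro cur hcur w hw
    simp only [PySem.Chars.split₀.go] at hw
    split_ifs at hw with h1 h2
    · obtain ⟨hne, hmem⟩ := ih [] (by simp) w hw
      exact ⟨hne, fun d hd => ⟨Or.inr (List.mem_cons_of_mem c ((hmem d hd).1.resolve_left (by simp))), (hmem d hd).2⟩⟩
    · rw [pvSplit0_go_acc] at hw
      simp only [List.reverse_cons, List.reverse_nil, List.nil_append, List.singleton_append, List.mem_cons] at hw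
      rcases hw with hw | hw
      · subst hw
        refine ⟨by simpa [List.isEmpty_iff] using h2, fun d hd => ⟨Or.inl (by simpa using hd), hcur d (by simpa using hd)⟩⟩
      · obtain ⟨hne, hmem⟩ := ih [] (by simp) w hw
        exact ⟨hne, fun d hd => ⟨Or.inr (by simp [((hmem d hd).1.resolve_left (by simp))]), (hmem d hd).2⟩⟩
    · obtain ⟨hne, hmem⟩ := ih (c :: cur) (fun d hd => by rcases List.mem_cons.mp hd with h | h; exacts [h ▸ eq_false_of_ne_true h1, hcur d h]) w hw
      refine ⟨hne, fun d hd => ?_⟩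
      rcases hmem d hd with ⟨hin, hs⟩
      refine ⟨?_, hs⟩
      rcases hin with h | h
      · rcases List.mem_cons.mp h with h | h
        · subst h; exact Or.inr (by simp)
        · exact Or.inl h
      · exact Or.inr (by simp [h])

theorem pvSplit0_sound (cs : List Char) :
    ∀ w ∈ PySem.Chars.split₀ cs, w ≠ [] ∧ ∀ c ∈ w, c ∈ cs ∧ PySem.Chars.isspace c = false := by
  intro w hw
  obtain ⟨hne, hmem⟩ := pvSplit0_go_sound cs [] (by simp) w hw
  exact ⟨hne, fun c hc => ⟨((hmem c hc).1).resolve_left (by simp), (hmem c hc).2⟩⟩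

-- split₀ of a concatenation of space-terminated nonempty whitespace-free chunks
theorem pvSplit0_flatten (chains : List (List Char))
    (h : ∀ w ∈ chains, w ≠ [] ∧ ∀ c ∈ w, PySem.Chars.isspace c = false) :
    PySem.Chars.split₀ ((chains.map (fun w => w ++ [' '])).flatten) = chains := by
  induction chains with
  | nil => rfl
  | cons w rest ih =>
    simp only [List.map_cons, List.flatten_cons, List.append_assoc, List.cons_append, List.nil_append]
    rw [pvSplit0_cons_word w _ (h w (by simp)).1 (h w (by simp)).2]
    rw [ih (fun v hv => h v (by simp [hv]))]

-- ===== splitOn (sep = "#") lemmas =====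
theorem pvSplitOn_go_acc (sep : List Char) (fuel : Nat) : ∀ (l cur : List Char) (acc : List (List Char)),
    PySem.Chars.splitOn.go sep fuel l cur acc = acc.reverse ++ PySem.Chars.splitOn.go sep fuel l cur [] := by
  induction fuel with
  | zero => intro l cur acc; simp [PySem.Chars.splitOn.go]
  | succ fuel ih =>
    intro l cur acc
    match l with
    | [] => simp [PySem.Chars.splitOn.go]
    | c :: rest =>
      simp only [PySem.Chars.splitOn.go]
      split_ifs with h
      · rw [ih _ [] (cur.reverse :: acc), ih _ [] [cur.reverse]]; simp
      · exact ih rest (c :: cur) acc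

theorem pvSplitOn_go_nil (fuel : Nat) (cur : List Char) (acc : List (List Char)) :
    PySem.Chars.splitOn.go ['#'] fuel [] cur acc = (cur.reverse :: acc).reverse := by
  cases fuel <;> simp [PySem.Chars.splitOn.go]

theorem pvSplitOn_go_skip (w : List Char) : ∀ (fuel : Nat) (l cur : List Char) (acc : List (List Char)),
    '#' ∉ w →
    PySem.Chars.splitOn.go ['#'] (fuel + w.length) (w ++ l) cur acc =
      PySem.Chars.splitOn.go ['#'] fuel l (w.reverse ++ cur) acc := by
  induction w with
  | nil => intro fuel l cur acc _; simp
  | cons c rest ih =>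
    intro fuel l cur acc hw
    have hlen : fuel + (c :: rest).length = (fuel + rest.length) + 1 := by simp [List.length_cons]; omega
    rw [hlen]
    simp only [List.cons_append, PySem.Chars.splitOn.go]
    rw [if_neg (by simp; rintro rfl; exact hw (by simp))]
    rw [ih fuel l (c :: cur) acc (fun h => hw (by simp [h]))]
    simp

theorem pvSplitOn_nosep (g : List Char) (hg : '#' ∉ g) :
    PySem.Chars.splitOn g ['#'] = [g] := by
  unfold PySem.Chars.splitOn
  have : g.length + 1 = 1 + g.length := by omega
  rw [this]
  have h2 := pvSplitOn_go_skip g 1 [] [] [] hg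
  simp only [List.append_nil] at h2
  rw [h2, pvSplitOn_go_nil]
  simp

theorem pvSplitOn_cons (g rest : List Char) (hg : '#' ∉ g) :
    PySem.Chars.splitOn (g ++ '#' :: rest) ['#'] = g :: PySem.Chars.splitOn rest ['#'] := by
  unfold PySem.Chars.splitOn
  have h1 : (g ++ '#' :: rest).length + 1 = ((rest.length + 1) + 1) + g.length := by simp; omega
  rw [h1, pvSplitOn_go_skip g ((rest.length + 1) + 1) ('#' :: rest) [] [] hg]
  simp only [PySem.Chars.splitOn.go]
  rw [if_pos (by simp [List.isPrefixOf])]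
  simp only [List.length_cons, List.length_nil, List.drop_succ_cons, List.drop_zero]
  rw [pvSplitOn_go_acc]
  simp

-- ===== join lemmas =====
theorem pvJoin_append_singleton (sep p : List Char) : ∀ (ps : List (List Char)), ps ≠ [] →
    PySem.Chars.join sep (ps ++ [p]) = PySem.Chars.join sep ps ++ sep ++ p := by
  intro ps
  induction ps with
  | nil => intro h; exact absurd rfl h
  | cons q rest ih =>
    intro _
    cases rest with
    | nil => simp [PySem.Chars.join_cons_cons, PySem.Chars.join_singleton]
    | cons r rest' =>
      simp only [List.cons_append, PySem.Chars.join_cons_cons]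
      rw [show r :: (rest' ++ [p]) = (r :: rest') ++ [p] by simp, ih (by simp)]
      simp

theorem pvMem_join (sep : List Char) (c : Char) : ∀ (ps : List (List Char)),
    c ∈ PySem.Chars.join sep ps → c ∈ sep ∨ ∃ p ∈ ps, c ∈ p := by
  intro ps
  induction ps with
  | nil => intro h; simp [PySem.Chars.join_nil] at h
  | cons q rest ih =>
    cases rest with
    | nil => intro h; rw [PySem.Chars.join_singleton] at h; exact Or.inr ⟨q, by simp, h⟩
    | cons r rest' =>
      intro h
      rw [PySem.Chars.join_cons_cons] at h
      simp only [List.append_assoc, List.mem_append] at h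
      rcases h with h | h | h
      · exact Or.inr ⟨q, by simp, h⟩
      · exact Or.inl h
      · rcases ih h with h | ⟨p, hp, hc⟩
        · exact Or.inl h
        · exact Or.inr ⟨p, by simp [hp], hc⟩

theorem pvJoin_ne_nil (sep p : List Char) (rest : List (List Char)) (hp : p ≠ []) :
    PySem.Chars.join sep (p :: rest) ≠ [] := by
  cases rest with
  | nil => simpa [PySem.Chars.join_singleton]
  | cons r rest' => rw [PySem.Chars.join_cons_cons]; simp [hp]

-- ===== splitOn of joined grams =====
theorem pvSplitOn_join (gs : List (List Char)) (hgs : ∀ g ∈ gs, '#' ∉ g) (hne : gs ≠ []) :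
    PySem.Chars.splitOn (PySem.Chars.join ['#'] gs) ['#'] = gs := by
  induction gs with
  | nil => exact absurd rfl hne
  | cons g rest ih =>
    cases rest with
    | nil => rw [PySem.Chars.join_singleton]; exact pvSplitOn_nosep g (hgs g (by simp))
    | cons r rest' =>
      rw [PySem.Chars.join_cons_cons, List.append_assoc,
        show ['#'] ++ PySem.Chars.join ['#'] (r :: rest') = '#' :: PySem.Chars.join ['#'] (r :: rest') by simp,
        pvSplitOn_cons g _ (hgs g (by simp))]
      rw [ih (fun v hv => hgs v (by simp [hv])) (by simp)]

theorem pvSplitOn_join_hash (gs : List (List Char)) (hgs : ∀ g ∈ gs, '#' ∉ g) (hne : gs ≠ []) :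
    PySem.Chars.splitOn (PySem.Chars.join ['#'] gs ++ ['#']) ['#'] = gs ++ [[]] := by
  induction gs with
  | nil => exact absurd rfl hne
  | cons g rest ih =>
    cases rest with
    | nil =>
      rw [PySem.Chars.join_singleton]
      rw [show g ++ ['#'] = g ++ '#' :: [] by simp, pvSplitOn_cons g [] (hgs g (by simp))]
      rfl
    | cons r rest' =>
      rw [PySem.Chars.join_cons_cons]
      rw [show g ++ ['#'] ++ PySem.Chars.join ['#'] (r :: rest') ++ ['#'] =
            g ++ '#' :: (PySem.Chars.join ['#'] (r :: rest') ++ ['#']) by simp]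
      rw [pvSplitOn_cons g _ (hgs g (by simp))]
      rw [ih (fun v hv => hgs v (by simp [hv])) (by simp)]
      simp

-- ===== n-gram helpers (proof-side abstractions) =====
def pvGram (words : List (List Char)) (i j : Nat) : List Char :=
  PySem.Chars.join ['=', '='] ((words.drop i).take j)

def pvT (m : Int) (n i : Nat) : Nat := min m.toNat (n - i)

def pvCStep (words : List (List Char)) (i : Nat) (ng : List (List String)) (q : Nat) : List (List String) :=
  ng.set q (ng.getD q [] ++ [String.ofList (pvGram words i (q + 1))])

def pvStep (words : List (List Char)) (m : Int) (ng : List (List String)) (i : Nat) : List (List String) :=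
  (List.range (pvT m words.length i)).foldl (pvCStep words i) ng

def pvCanon (words : List (List Char)) (m : Int) : List (List String) :=
  (List.range words.length).foldl (pvStep words m) (List.replicate m.toNat [])

def pvChain (words : List (List Char)) (m : Int) (i : Nat) : List Char :=
  PySem.Chars.join ['#'] ((List.range (pvT m words.length i)).map (fun q => pvGram words i (q + 1))) ++
    (if ((pvT m words.length i : Int)) < m then ['#'] else [])

theorem pvPyRange_one (M : Nat) :
    PySem.List.pyRange 1 ((M : ℤ) + 1) = (List.range M).map (fun q : ℕ => (q : ℤ) + 1) := by
  induction M with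
  | zero => rfl
  | succ M ih =>
    rw [show ((M + 1 : ℕ) : ℤ) + 1 = ((M : ℤ) + 1) + 1 by push_cast; ring,
      PySem.List.pyRange_one_succ_right (by omega), ih, List.range_succ]
    simp

theorem pvGram_one (words : List (List Char)) (i : Nat) (h : i < words.length) :
    pvGram words i 1 = words.getD i [] := by
  unfold pvGram
  rw [List.drop_eq_getElem_cons h, List.take_succ_cons, List.take_zero,
    PySem.Chars.join_singleton, List.getD_eq_getElem _ _ h]

theorem pvGram_succ (words : List (List Char)) (i t : Nat) (ht : 1 ≤ t) (hn : i + t + 1 ≤ words.length) :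
    pvGram words i (t + 1) = pvGram words i t ++ ['=', '='] ++ words.getD (i + t) [] := by
  unfold pvGram
  rw [List.take_add_one]
  have hlt : t < (words.drop i).length := by simp; omega
  rw [List.getElem?_eq_getElem hlt]
  simp only [Option.toList_some]
  rw [pvJoin_append_singleton _ _ _ (by
    have : ((words.drop i).take t).length = t := by simp; omega
    intro hnil; rw [hnil] at this; simp at this; omega)]
  congr 1
  rw [List.getElem_drop, List.getD_eq_getElem _ _ (by omega : i + t < words.length)]

theorem pvGram_ne_nil (words : List (List Char)) (i j : Nat) (hi : i < words.length)
    (hw : ∀ w ∈ words, w ≠ []) (hj : 1 ≤ j) : pvGram words i j ≠ [] := by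
  unfold pvGram
  rw [List.drop_eq_getElem_cons hi]
  cases j with
  | zero => omega
  | succ j' =>
    rw [List.take_succ_cons]
    exact pvJoin_ne_nil _ _ _ (hw _ (List.getElem_mem hi))

theorem pvGram_mem (words : List (List Char)) (i j : Nat) (c : Char)
    (hc : c ∈ pvGram words i j) : c = '=' ∨ ∃ w ∈ words, c ∈ w := by
  rcases pvMem_join _ _ _ hc with h | ⟨p, hp, hcp⟩
  · simp at h; exact Or.inl h
  · exact Or.inr ⟨p, List.mem_of_mem_drop (List.mem_of_mem_take hp), hcp⟩

-- ===== B side: the incremental inner loop computes pvStep =====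
theorem pvAlt_inner (words : List (List Char)) (i : Nat) (hi : i < words.length) :
    ∀ (t : Nat), i + t ≤ words.length →
    ∀ (ngram : List (List String)),
    (PySem.List.pyRange 1 ((t : ℤ) + 1)).foldl
      (fun (st : List Char × List (List String)) (j : ℤ) =>
        let gram := if j == 1 then PySem.List.pyGetD words (i : ℤ) []
                    else st.1 ++ ['=', '='] ++ PySem.List.pyGetD words ((i : ℤ) + j - 1) []
        (gram, st.2.set (j - 1).toNat (st.2.getD (j - 1).toNat [] ++ [String.ofList gram])))
      (([] : List Char), ngram) =
    (pvGram words i t, (List.range t).foldl (pvCStep words i) ngram) := by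
  intro t
  induction t with
  | zero =>
    intro _ ngram
    simp [pvGram]
  | succ t ih =>
    intro hn ngram
    rw [show ((t + 1 : ℕ) : ℤ) + 1 = ((t : ℤ) + 1) + 1 by push_cast; ring,
      PySem.List.pyRange_one_succ_right (by omega), List.foldl_append,
      ih (by omega) ngram]
    simp only [List.foldl_cons, List.foldl_nil]
    have hidx : ((t : ℤ) + 1 - 1).toNat = t := by omega
    cases t with
    | zero =>
      simp only [Nat.cast_zero, zero_add, beq_self_eq_true, if_true]
      rw [PySem.List.pyGetD_natCast words i [], ← pvGram_one words i hi]
      simp [pvCStep, List.range_succ]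
    | succ t' =>
      rw [if_neg (by simp; omega)]
      rw [show (i : ℤ) + ((t' + 1 : ℕ) + 1) - 1 = ((i + (t' + 1) : ℕ) : ℤ) by push_cast; ring]
      rw [PySem.List.pyGetD_natCast words (i + (t' + 1)) []]
      rw [← pvGram_succ words i (t' + 1) (by omega) (by omega)]
      simp [pvCStep, List.range_succ]
theorem pvAlt_eq_canon (line : String) (m : Int) :
    take_ngrams_alt line m = pvCanon (PySem.Chars.split₀ line.toList) m := by
  simp only [take_ngrams_alt, pvCanon]
  rw [PySem.List.pyRange_zero_natCast, List.foldl_map]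
  apply PySem.List.foldl_congr_mem
  intro ngram q hq
  have hqn : q < (PySem.Chars.split₀ line.toList).length := List.mem_range.mp hq
  by_cases hm : 1 ≤ m
  · have hmin : min m (((PySem.Chars.split₀ line.toList).length : ℤ) - (q : ℤ)) =
        ((pvT m (PySem.Chars.split₀ line.toList).length q : ℕ) : ℤ) := by
      unfold pvT; push_cast; omega
    rw [hmin, pvAlt_inner _ q hqn _ (by unfold pvT; omega)]
    rfl
  · have h0 : min m (((PySem.Chars.split₀ line.toList).length : ℤ) - (q : ℤ)) + 1 ≤ 1 := by omega
    rw [PySem.List.pyRange_one_eq_nil (by omega)]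
    unfold pvStep
    have : pvT m (PySem.Chars.split₀ line.toList).length q = 0 := by unfold pvT; omega
    rw [this]
    rfl

-- ===== enumerate lemmas =====
theorem pvEnum_cons {α : Type} (x : α) (xs : List α) (s : ℤ) :
    PySem.List.enumerate (x :: xs) s = (s, x) :: PySem.List.enumerate xs (s + 1) := rfl

theorem pvEnum_append {α : Type} (xs : List α) : ∀ (ys : List α) (s : ℤ),
    PySem.List.enumerate (xs ++ ys) s =
      PySem.List.enumerate xs s ++ PySem.List.enumerate ys (s + xs.length) := by
  induction xs with
  | nil => intro ys s; simp [PySem.List.enumerate]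
  | cons x rest ih =>
    intro ys s
    simp only [List.cons_append, pvEnum_cons, ih ys (s + 1), List.length_cons]
    congr 2
    push_cast
    ring

theorem pvEnum_foldl {α β : Type} (f : β → ℤ → β) : ∀ (xs : List α) (s : ℤ) (b : β),
    (PySem.List.enumerate xs s).foldl (fun b iw => f b iw.1) b =
      (List.range xs.length).foldl (fun b (q : ℕ) => f b (s + (q : ℤ))) b := by
  intro xs
  induction xs with
  | nil => intro s b; rfl
  | cons x rest ih =>
    intro s b
    rw [pvEnum_cons, List.foldl_cons, ih (s + 1), List.length_cons, List.range_succ_eq_map,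
      List.foldl_cons, List.foldl_map]
    simp only [Nat.cast_zero, add_zero]
    apply PySem.List.foldl_congr_mem
    intro acc q _
    congr 1
    push_cast [Nat.succ_eq_add_one]
    ring

-- ===== the per-chain accumulation equals the canonical per-index fold =====
theorem pvPieces_fold (gs : List (List Char)) :
    ∀ (s : Nat) (ngram : List (List String)),
    (∀ g ∈ gs, g ≠ [] ∧ g ≠ ['\n']) →
    (PySem.List.enumerate gs (s : ℤ)).foldl
      (fun ngram p =>
        if p.2 ≠ [] ∧ p.2 ≠ ['\n'] then
          ngram.set p.1.toNat (ngram.getD p.1.toNat [] ++ [String.ofList p.2])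
        else ngram) ngram =
    (List.range gs.length).foldl
      (fun ng q => ng.set (s + q) (ng.getD (s + q) [] ++ [String.ofList (gs.getD q [])])) ngram := by
  induction gs with
  | nil => intro s ngram _; rfl
  | cons g rest ih =>
    intro s ngram hg
    rw [pvEnum_cons, List.foldl_cons, if_pos ⟨(hg g (by simp)).1, (hg g (by simp)).2⟩]
    have hs1 : ((s : ℤ) + 1) = ((s + 1 : ℕ) : ℤ) := by push_cast; ring
    rw [hs1, ih (s + 1) _ (fun v hv => hg v (by simp [hv]))]
    rw [List.length_cons, List.range_succ_eq_map, List.foldl_cons, List.foldl_map]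
    simp only [Int.toNat_natCast, List.getD_cons_zero, add_zero]
    apply PySem.List.foldl_congr_mem
    intro acc q _
    simp only [Nat.succ_eq_add_one, List.getD_cons_succ]
    have : s + 1 + q = s + (q + 1) := by omega
    rw [this]

-- ===== A side: the serialized text of one gram =====
theorem pvGramText (words : List (List Char)) (i : Nat) : ∀ (j : Nat), 1 ≤ j → i + j ≤ words.length →
    (PySem.List.pyRange (i : ℤ) ((i : ℤ) + (j : ℤ) - 1)).flatMap
        (fun k => PySem.List.pyGetD words k [] ++ ['=', '=']) ++
      PySem.List.pyGetD words ((i : ℤ) + (j : ℤ) - 1) [] = pvGram words i j := by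
  intro j
  induction j with
  | zero => omega
  | succ j ih =>
    intro _ hn
    cases Nat.eq_or_lt_of_le (by omega : 1 ≤ j + 1) with
    | inl h =>
      have hj : j = 0 := by omega
      subst hj
      rw [show (i : ℤ) + ((0 + 1 : ℕ) : ℤ) - 1 = (i : ℤ) by push_cast; ring]
      rw [PySem.List.pyRange_one_eq_nil (by omega), PySem.List.pyGetD_natCast]
      rw [pvGram_one words i (by omega)]
      simp
    | inr h =>
      have hj1 : 1 ≤ j := by omega
      have harg : (i : ℤ) + ((j + 1 : ℕ) : ℤ) - 1 = ((i : ℤ) + (j : ℤ) - 1) + 1 := by push_cast; ring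
      rw [harg, PySem.List.pyRange_one_succ_right (by omega), List.flatMap_append]
      simp only [List.flatMap_cons, List.flatMap_nil, List.append_nil]
      rw [show ((i : ℤ) + (j : ℤ) - 1) + 1 = ((i + j : ℕ) : ℤ) by push_cast; ring]
      rw [PySem.List.pyGetD_natCast]
      rw [pvGram_succ words i j hj1 (by omega), ← ih hj1 (by omega)]
      simp [List.append_assoc]

-- ===== flatMap shapes for the '#'-joined chain =====
theorem pvFlat_hash (g : Nat → List Char) : ∀ (T : Nat), 1 ≤ T →
    (List.range T).flatMap (fun q => g q ++ ['#']) =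
      PySem.Chars.join ['#'] ((List.range T).map g) ++ ['#'] := by
  intro T
  induction T with
  | zero => omega
  | succ T ih =>
    intro _
    cases Nat.eq_zero_or_pos T with
    | inl h => subst h; simp [PySem.Chars.join_singleton, List.range_succ]
    | inr h =>
      rw [List.range_succ, List.flatMap_append, List.map_append, List.map_singleton, ih h,
        pvJoin_append_singleton _ _ _ (by simp [List.range_eq_nil]; omega)]
      simp

theorem pvFlat_space (off : Nat) : ∀ (K : Nat), 1 ≤ K →
    (List.range K).flatMap (fun r => if off + r + 1 = off + K then [' '] else []) = [' '] := by
  intro K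
  induction K with
  | zero => omega
  | succ K ih =>
    intro _
    rw [List.range_succ, List.flatMap_append]
    have h1 : (List.range K).flatMap (fun r => if off + r + 1 = off + (K + 1) then [' '] else []) = [] := by
      rw [List.flatMap_eq_nil_iff]
      intro r hr
      rw [if_neg (by have := List.mem_range.mp hr; omega)]
    rw [h1]
    simp only [List.flatMap_cons, List.flatMap_nil, List.nil_append]
    rw [if_pos (by omega)]
    simp

-- ===== A side: one iteration of the word loop appends the chain text =====
def pvHfun (words : List (List Char)) (m : Int) (i : Nat) (j : ℤ) : List Char :=
  (if (i : ℤ) + j ≤ (words.length : ℤ) then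
     (PySem.List.pyRange (i : ℤ) ((i : ℤ) + j - 1)).flatMap
        (fun k => PySem.List.pyGetD words k [] ++ ['=', '=']) ++
       PySem.List.pyGetD words ((i : ℤ) + j - 1) [] ++
       (if j < m then ['#'] else [])
   else []) ++ (if j == m then [' '] else [])

theorem pvAInner (words : List (List Char)) (m : Int) (i : Nat) (nl : List Char) :
    (PySem.List.pyRange 1 (m + 1)).foldl
      (fun nl j =>
        let nl' :=
          if (i : ℤ) + j ≤ (words.length : ℤ) then
            let nl2 := (PySem.List.pyRange (i : ℤ) ((i : ℤ) + j - 1)).foldl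
                (fun nl k => nl ++ PySem.List.pyGetD words k [] ++ ['=', '=']) nl
            let nl3 := nl2 ++ PySem.List.pyGetD words ((i : ℤ) + j - 1) []
            if j < m then nl3 ++ ['#'] else nl3
          else nl
        if j == m then nl' ++ [' '] else nl') nl =
    nl ++ (PySem.List.pyRange 1 (m + 1)).flatMap (pvHfun words m i) := by
  rw [show (PySem.List.pyRange 1 (m + 1)).foldl
      (fun nl j =>
        let nl' :=
          if (i : ℤ) + j ≤ (words.length : ℤ) then
            let nl2 := (PySem.List.pyRange (i : ℤ) ((i : ℤ) + j - 1)).foldl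
                (fun nl k => nl ++ PySem.List.pyGetD words k [] ++ ['=', '=']) nl
            let nl3 := nl2 ++ PySem.List.pyGetD words ((i : ℤ) + j - 1) []
            if j < m then nl3 ++ ['#'] else nl3
          else nl
        if j == m then nl' ++ [' '] else nl') nl =
      (PySem.List.pyRange 1 (m + 1)).foldl (fun nl j => nl ++ pvHfun words m i j) nl from ?_]
  · exact PySem.List.foldl_append_eq_flatMap _ _ _
  · apply PySem.List.foldl_congr_mem
    intro acc j _
    simp only [pvHfun]
    have hfold : ∀ (a : List Char), (PySem.List.pyRange (i : ℤ) ((i : ℤ) + j - 1)).foldl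
        (fun nl k => nl ++ PySem.List.pyGetD words k [] ++ ['=', '=']) a =
        a ++ (PySem.List.pyRange (i : ℤ) ((i : ℤ) + j - 1)).flatMap
          (fun k => PySem.List.pyGetD words k [] ++ ['=', '=']) := by
      intro a
      rw [show (fun (nl : List Char) k => nl ++ PySem.List.pyGetD words k [] ++ ['=', '=']) =
        (fun (nl : List Char) k => nl ++ (PySem.List.pyGetD words k [] ++ ['=', '='])) by
          funext nl k; simp]
      exact PySem.List.foldl_append_eq_flatMap _ _ _
    split_ifs with h1 h2 h3 <;> simp [hfold, List.append_assoc, ← List.flatMap_def]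

theorem pvChainFlat_core (words : List (List Char)) (m : Int) (i : Nat)
    (hm : 1 ≤ m) (hi : i < words.length) :
    (List.range m.toNat).flatMap (fun q =>
      (if q < pvT m words.length i then
        pvGram words i (q + 1) ++ (if q + 1 < m.toNat then ['#'] else []) else []) ++
      (if q + 1 = m.toNat then [' '] else [])) = pvChain words m i ++ [' '] := by
  have hMm : ((m.toNat : ℕ) : ℤ) = m := Int.toNat_of_nonneg (by omega)
  have ht1 : 1 ≤ pvT m words.length i := by unfold pvT; omega
  have htM : pvT m words.length i ≤ m.toNat := by unfold pvT; omega
  unfold pvChain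
  generalize hT : pvT m words.length i = t at ht1 htM ⊢
  rcases Nat.lt_or_ge t m.toNat with hlt | hge
  · have hsplit : List.range m.toNat = List.range t ++ (List.range (m.toNat - t)).map (fun x => t + x) := by
      conv_lhs => rw [show m.toNat = t + (m.toNat - t) by omega]
      exact List.range_add
    rw [hsplit, List.flatMap_append]
    have h1 : (List.range t).flatMap (fun q =>
        (if q < t then pvGram words i (q + 1) ++ (if q + 1 < m.toNat then ['#'] else []) else []) ++
        (if q + 1 = m.toNat then [' '] else [])) =
        (List.range t).flatMap (fun q => pvGram words i (q + 1) ++ ['#']) := by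
      apply List.flatMap_congr
      intro q hq
      have := List.mem_range.mp hq
      rw [if_pos this, if_pos (by omega), if_neg (by omega)]
      exact List.append_nil _
    have h2 : ((List.range (m.toNat - t)).map (fun x => t + x)).flatMap (fun q =>
        (if q < t then pvGram words i (q + 1) ++ (if q + 1 < m.toNat then ['#'] else []) else []) ++
        (if q + 1 = m.toNat then [' '] else [])) =
        (List.range (m.toNat - t)).flatMap (fun r => if t + r + 1 = t + (m.toNat - t) then [' '] else []) := by
      rw [List.flatMap_map]
      apply List.flatMap_congr
      intro r hr
      have hrr := List.mem_range.mp hr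
      rw [if_neg (by omega)]
      by_cases hh : t + r + 1 = m.toNat
      · rw [if_pos hh, if_pos (by omega)]; simp
      · rw [if_neg hh, if_neg (by omega)]; simp
    rw [h1, h2, pvFlat_hash _ t ht1, pvFlat_space t (m.toNat - t) (by omega)]
    rw [if_pos (by omega : ((t : ℕ) : ℤ) < m)]
  · have htm : t = m.toNat := by omega
    have h1 : (List.range m.toNat).flatMap (fun q =>
        (if q < t then pvGram words i (q + 1) ++ (if q + 1 < m.toNat then ['#'] else []) else []) ++
        (if q + 1 = m.toNat then [' '] else [])) =
        (List.range (m.toNat - 1)).flatMap (fun q => pvGram words i (q + 1) ++ ['#']) ++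
          (pvGram words i m.toNat ++ [' ']) := by
      conv_lhs => rw [show m.toNat = (m.toNat - 1) + 1 by omega]
      rw [List.range_succ, List.flatMap_append]
      congr 1
      · apply List.flatMap_congr
        intro q hq
        have := List.mem_range.mp hq
        rw [if_pos (by omega), if_pos (by omega), if_neg (by omega)]
        exact List.append_nil _
      · simp only [List.flatMap_cons, List.flatMap_nil, List.append_nil]
        rw [if_pos (by omega : m.toNat - 1 < t),
          if_neg (by omega : ¬ (m.toNat - 1 + 1 < m.toNat - 1 + 1))]
        simp [show m.toNat - 1 + 1 = m.toNat by omega]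
    rw [h1]
    rw [if_neg (by omega : ¬ ((t : ℕ) : ℤ) < m), htm]
    rcases Nat.eq_or_lt_of_le (by omega : 1 ≤ m.toNat) with h1m | h1m
    · rw [← h1m]
      simp [PySem.Chars.join_singleton, List.range_succ]
    · rw [pvFlat_hash _ (m.toNat - 1) (by omega)]
      rw [show (List.range m.toNat).map (fun q => pvGram words i (q + 1)) =
          (List.range (m.toNat - 1)).map (fun q => pvGram words i (q + 1)) ++ [pvGram words i m.toNat] by
        conv_lhs => rw [show m.toNat = (m.toNat - 1) + 1 by omega]
        rw [List.range_succ, List.map_append]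
        simp [show m.toNat - 1 + 1 = m.toNat by omega]]
      rw [pvJoin_append_singleton _ _ _ (by simp [List.range_eq_nil]; omega)]
      simp

theorem pvChainFlat (words : List (List Char)) (m : Int) (i : Nat)
    (hm : 1 ≤ m) (hi : i < words.length) :
    (PySem.List.pyRange 1 (m + 1)).flatMap (pvHfun words m i) = pvChain words m i ++ [' '] := by
  have hMm : ((m.toNat : ℕ) : ℤ) = m := Int.toNat_of_nonneg (by omega)
  have hcongr : ∀ q ∈ List.range m.toNat, pvHfun words m i ((q : ℤ) + 1) =
      (if q < pvT m words.length i then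
        pvGram words i (q + 1) ++ (if q + 1 < m.toNat then ['#'] else []) else []) ++
      (if q + 1 = m.toNat then [' '] else []) := by
    intro q hq
    have hqM : q < m.toNat := List.mem_range.mp hq
    simp only [pvHfun]
    have hcond : ((i : ℤ) + ((q : ℤ) + 1) ≤ (words.length : ℤ)) ↔ q < pvT m words.length i := by
      unfold pvT; omega
    by_cases hc : q < pvT m words.length i
    · rw [if_pos (hcond.mpr hc)]
      have hgt := pvGramText words i (q + 1) (by omega) (by unfold pvT at hc; omega)
      rw [show (i : ℤ) + ((q : ℤ) + 1) - 1 = (i : ℤ) + ((q + 1 : ℕ) : ℤ) - 1 by push_cast; ring, hgt]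
      have hlt : ((q : ℤ) + 1 < m) ↔ (q + 1 < m.toNat) := by omega
      have heq : (((q : ℤ) + 1) == m) = decide (q + 1 = m.toNat) := by
        by_cases h : q + 1 = m.toNat <;> simp [h] <;> omega
      rw [heq, if_pos hc]
      by_cases h2 : q + 1 < m.toNat
      · rw [if_pos (hlt.mpr h2), if_pos h2]
        simp [List.append_assoc]
      · rw [if_neg (fun hh => h2 (hlt.mp hh)), if_neg h2]
        simp [List.append_assoc]
    · rw [if_neg (fun hh => hc (hcond.mp hh))]
      rw [if_neg (by omega : ¬ q < pvT m words.length i)]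
      rw [show (((q : ℤ) + 1) == m) = decide (q + 1 = m.toNat) by
        by_cases h : q + 1 = m.toNat <;> simp [h] <;> omega]
      simp
  have hbridge : (PySem.List.pyRange 1 (m + 1)).flatMap (pvHfun words m i) =
      (List.range m.toNat).flatMap (fun q : ℕ => pvHfun words m i ((q : ℤ) + 1)) := by
    rw [show m + 1 = ((m.toNat : ℕ) : ℤ) + 1 by omega, pvPyRange_one m.toNat, List.flatMap_map]
  rw [hbridge]
  exact (List.flatMap_congr hcongr).trans (pvChainFlat_core words m i hm hi)

-- ===== well-formedness of grams and chains =====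
theorem pvGram_props (words : List (List Char))
    (hw : ∀ w ∈ words, w ≠ [] ∧ ∀ c ∈ w, c ≠ '#' ∧ PySem.Chars.isspace c = false)
    (i j : Nat) (hi : i < words.length) (hj : 1 ≤ j) :
    pvGram words i j ≠ [] ∧ '#' ∉ pvGram words i j ∧ pvGram words i j ≠ ['\n'] ∧
      ∀ c ∈ pvGram words i j, PySem.Chars.isspace c = false := by
  have hne := pvGram_ne_nil words i j hi (fun w hw' => (hw w hw').1) hj
  have hchar : ∀ c ∈ pvGram words i j, c ≠ '#' ∧ PySem.Chars.isspace c = false := by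
    intro c hc
    rcases pvGram_mem words i j c hc with h | ⟨w, hwmem, hcw⟩
    · subst h; exact ⟨by decide, by decide⟩
    · exact (hw w hwmem).2 c hcw
  refine ⟨hne, fun hmem => (hchar '#' hmem).1 rfl, fun heq => ?_, fun c hc => (hchar c hc).2⟩
  · have : '\n' ∈ pvGram words i j := by rw [heq]; simp
    have := (hchar '\n' this).2
    simp [PySem.Chars.isspace] at this

theorem pvChain_props (words : List (List Char)) (m : Int) (i : Nat)
    (hw : ∀ w ∈ words, w ≠ [] ∧ ∀ c ∈ w, c ≠ '#' ∧ PySem.Chars.isspace c = false)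
    (hm : 1 ≤ m) (hi : i < words.length) :
    pvChain words m i ≠ [] ∧ ∀ c ∈ pvChain words m i, PySem.Chars.isspace c = false := by
  have ht1 : 1 ≤ pvT m words.length i := by unfold pvT; omega
  constructor
  · unfold pvChain
    apply List.append_ne_nil_of_left_ne_nil
    obtain ⟨t', ht'⟩ : ∃ t', pvT m words.length i = t' + 1 := ⟨pvT m words.length i - 1, by omega⟩
    rw [ht', List.range_succ_eq_map, List.map_cons]
    exact pvJoin_ne_nil _ _ _ (pvGram_props words hw i 1 hi (by omega)).1
  · intro c hc
    unfold pvChain at hc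
    rcases List.mem_append.mp hc with h | h
    · rcases pvMem_join _ _ _ h with h | ⟨p, hp, hcp⟩
      · simp at h; subst h; decide
      · obtain ⟨q, hq, hpq⟩ := List.mem_map.mp hp
        exact (pvGram_props words hw i (q + 1) hi (by omega)).2.2.2 c (hpq ▸ hcp)
    · split_ifs at h
      · simp at h; subst h; decide
      · simp at h

theorem pvPieces_fold0 (gs : List (List Char)) (ngram : List (List String))
    (h : ∀ g ∈ gs, g ≠ [] ∧ g ≠ ['\n']) :
    (PySem.List.enumerate gs 0).foldl
      (fun ngram p =>
        if p.2 ≠ [] ∧ p.2 ≠ ['\n'] then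
          ngram.set p.1.toNat (ngram.getD p.1.toNat [] ++ [String.ofList p.2])
        else ngram) ngram =
    (List.range gs.length).foldl
      (fun ng q => ng.set q (ng.getD q [] ++ [String.ofList (gs.getD q [])])) ngram := by
  have hp := pvPieces_fold gs 0 ngram h
  simpa using hp

theorem pvA_eq_canon (line : String) (m : Int) (hpre : '#' ∉ line.toList) :
    take_ngrams line m = pvCanon (PySem.Chars.split₀ line.toList) m := by
  have hw : ∀ w ∈ PySem.Chars.split₀ line.toList,
      w ≠ [] ∧ ∀ c ∈ w, c ≠ '#' ∧ PySem.Chars.isspace c = false := by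
    intro w hwm
    obtain ⟨h1, h2⟩ := pvSplit0_sound line.toList w hwm
    exact ⟨h1, fun c hc => ⟨fun hch => hpre (hch ▸ (h2 c hc).1), (h2 c hc).2⟩⟩
  simp only [take_ngrams, pvCanon]
  by_cases hm : 1 ≤ m
  · -- 1 ≤ m : the serialized line decomposes into space-terminated chains
    have hNL : (PySem.List.enumerate (PySem.Chars.split₀ line.toList)).foldl
        (fun nl iw =>
          (PySem.List.pyRange 1 (m + 1)).foldl (fun nl j =>
            let nl' :=
              if iw.1 + j ≤ ((PySem.Chars.split₀ line.toList).length : ℤ) then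
                let nl2 := (PySem.List.pyRange iw.1 (iw.1 + j - 1)).foldl
                    (fun nl k => nl ++ PySem.List.pyGetD (PySem.Chars.split₀ line.toList) k [] ++ ['=', '=']) nl
                let nl3 := nl2 ++ PySem.List.pyGetD (PySem.Chars.split₀ line.toList) (iw.1 + j - 1) []
                if j < m then nl3 ++ ['#'] else nl3
              else nl
            if j == m then nl' ++ [' '] else nl') nl) [] =
        ((((List.range (PySem.Chars.split₀ line.toList).length).map
            (pvChain (PySem.Chars.split₀ line.toList) m)).map (fun w => w ++ [' '])).flatten) := by
      have h1 := pvEnum_foldl (α := List Char)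
        (fun nl z =>
          (PySem.List.pyRange 1 (m + 1)).foldl (fun nl j =>
            let nl' :=
              if z + j ≤ ((PySem.Chars.split₀ line.toList).length : ℤ) then
                let nl2 := (PySem.List.pyRange z (z + j - 1)).foldl
                    (fun nl k => nl ++ PySem.List.pyGetD (PySem.Chars.split₀ line.toList) k [] ++ ['=', '=']) nl
                let nl3 := nl2 ++ PySem.List.pyGetD (PySem.Chars.split₀ line.toList) (z + j - 1) []
                if j < m then nl3 ++ ['#'] else nl3
              else nl
            if j == m then nl' ++ [' '] else nl') nl)
        (PySem.Chars.split₀ line.toList) 0 []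
      refine h1.trans ?_
      have h2 : (List.range (PySem.Chars.split₀ line.toList).length).foldl
          (fun nl (q : ℕ) =>
            (PySem.List.pyRange 1 (m + 1)).foldl (fun nl j =>
              let nl' :=
                if (0 : ℤ) + (q : ℤ) + j ≤ ((PySem.Chars.split₀ line.toList).length : ℤ) then
                  let nl2 := (PySem.List.pyRange ((0 : ℤ) + (q : ℤ)) ((0 : ℤ) + (q : ℤ) + j - 1)).foldl
                      (fun nl k => nl ++ PySem.List.pyGetD (PySem.Chars.split₀ line.toList) k [] ++ ['=', '=']) nl
                  let nl3 := nl2 ++ PySem.List.pyGetD (PySem.Chars.split₀ line.toList) ((0 : ℤ) + (q : ℤ) + j - 1) []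
                  if j < m then nl3 ++ ['#'] else nl3
                else nl
              if j == m then nl' ++ [' '] else nl') nl) [] =
          (List.range (PySem.Chars.split₀ line.toList).length).foldl
            (fun nl (q : ℕ) => nl ++ (pvChain (PySem.Chars.split₀ line.toList) m q ++ [' '])) [] := by
        apply PySem.List.foldl_congr_mem
        intro acc q hq
        have hqn : q < (PySem.Chars.split₀ line.toList).length := List.mem_range.mp hq
        have hz : (0 : ℤ) + (q : ℤ) = ((q : ℕ) : ℤ) := by ring
        simp only [hz]
        have hInner := pvAInner (PySem.Chars.split₀ line.toList) m q acc
        refine hInner.trans ?_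
        rw [pvChainFlat (PySem.Chars.split₀ line.toList) m q hm hqn]
      refine h2.trans ?_
      rw [PySem.List.foldl_append_eq_flatMap
        (fun q : ℕ => pvChain (PySem.Chars.split₀ line.toList) m q ++ [' '])]
      simp [List.flatMap_def, List.map_map, Function.comp_def]
    rw [hNL]
    rw [pvSplit0_flatten ((List.range (PySem.Chars.split₀ line.toList).length).map
        (pvChain (PySem.Chars.split₀ line.toList) m)) ?hfacts]
    case hfacts =>
      intro w hwm
      obtain ⟨q, hq, rfl⟩ := List.mem_map.mp hwm
      exact ⟨(pvChain_props _ m q hw hm (List.mem_range.mp hq)).1,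
        (pvChain_props _ m q hw hm (List.mem_range.mp hq)).2⟩
    rw [List.foldl_map]
    apply PySem.List.foldl_congr_mem
    intro ng q hq
    have hqn : q < (PySem.Chars.split₀ line.toList).length := List.mem_range.mp hq
    have ht1 : 1 ≤ pvT m (PySem.Chars.split₀ line.toList).length q := by unfold pvT; omega
    -- the pieces of this chain
    have hgsprops : ∀ g ∈ (List.range (pvT m (PySem.Chars.split₀ line.toList).length q)).map
        (fun r => pvGram (PySem.Chars.split₀ line.toList) q (r + 1)),
        g ≠ [] ∧ g ≠ ['\n'] := by
      intro g hg
      obtain ⟨r, hr, rfl⟩ := List.mem_map.mp hg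
      exact ⟨(pvGram_props _ hw q (r + 1) hqn (by omega)).1,
        (pvGram_props _ hw q (r + 1) hqn (by omega)).2.2.1⟩
    have hgshash : ∀ g ∈ (List.range (pvT m (PySem.Chars.split₀ line.toList).length q)).map
        (fun r => pvGram (PySem.Chars.split₀ line.toList) q (r + 1)), '#' ∉ g := by
      intro g hg
      obtain ⟨r, hr, rfl⟩ := List.mem_map.mp hg
      exact (pvGram_props _ hw q (r + 1) hqn (by omega)).2.1
    have hgsne : (List.range (pvT m (PySem.Chars.split₀ line.toList).length q)).map
        (fun r => pvGram (PySem.Chars.split₀ line.toList) q (r + 1)) ≠ [] := by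
      simp [List.range_eq_nil]; omega
    have htail : ∀ ng', (List.range ((List.range (pvT m (PySem.Chars.split₀ line.toList).length q)).map
          (fun r => pvGram (PySem.Chars.split₀ line.toList) q (r + 1))).length).foldl
        (fun ng r => ng.set r (ng.getD r [] ++ [String.ofList
          (((List.range (pvT m (PySem.Chars.split₀ line.toList).length q)).map
            (fun r => pvGram (PySem.Chars.split₀ line.toList) q (r + 1))).getD r [])])) ng' =
        pvStep (PySem.Chars.split₀ line.toList) m ng' q := by
      intro ng'
      rw [show ((List.range (pvT m (PySem.Chars.split₀ line.toList).length q)).map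
          (fun r => pvGram (PySem.Chars.split₀ line.toList) q (r + 1))).length =
          pvT m (PySem.Chars.split₀ line.toList).length q by simp]
      unfold pvStep
      apply PySem.List.foldl_congr_mem
      intro acc r hr
      have hrt := List.mem_range.mp hr
      unfold pvCStep
      have hget : ((List.range (pvT m (PySem.Chars.split₀ line.toList).length q)).map
          (fun r => pvGram (PySem.Chars.split₀ line.toList) q (r + 1))).getD r [] =
          pvGram (PySem.Chars.split₀ line.toList) q (r + 1) := by
        rw [List.getD_eq_getElem?_getD, List.getElem?_map, List.getElem?_range hrt]
        rfl
      rw [hget]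
    unfold pvChain
    by_cases hc : ((pvT m (PySem.Chars.split₀ line.toList).length q : ℕ) : ℤ) < m
    · rw [if_pos hc]
      rw [pvSplitOn_join_hash _ hgshash hgsne]
      rw [pvEnum_append, List.foldl_append, pvPieces_fold0 _ ng hgsprops]
      simp only [PySem.List.enumerate, List.foldl_cons, List.foldl_nil]
      rw [if_neg (by simp)]
      exact htail _
    · rw [if_neg hc, List.append_nil]
      rw [pvSplitOn_join _ hgshash hgsne]
      rw [pvPieces_fold0 _ ng hgsprops]
      exact htail _
  · -- m ≤ 0 : no grams at all
    have hr : PySem.List.pyRange 1 (m + 1) = [] := PySem.List.pyRange_one_eq_nil (by omega)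
    rw [hr]
    simp only [List.foldl_nil]
    rw [List.foldl_fixed]
    rw [pvSplit0_nil]
    simp only [List.foldl_nil]
    have h0 : m.toNat = 0 := by omega
    rw [h0]
    simp only [List.replicate_zero]
    refine Eq.symm ?_
    have hstep : ∀ (ng : List (List String)), ∀ i ∈ List.range (PySem.Chars.split₀ line.toList).length,
        pvStep (PySem.Chars.split₀ line.toList) m ng i = ng := by
      intro ng i _
      unfold pvStep pvT
      rw [h0]
      simp
    exact (PySem.List.foldl_congr_mem _ _ (fun ng _ => ng) _ hstep).trans (List.foldl_fixed _)

theorem pv_main (line : String) (m : Int) (hpre : PySem.Str.isIn "#" line = false) :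
    take_ngrams line m = take_ngrams_alt line m := by
  have hmem : '#' ∉ line.toList := by
    intro hc
    have h' : PySem.Chars.isIn ['#'] line.toList = false := by simpa using hpre
    rw [(PySem.Chars.isIn_iff_infix ['#'] line.toList).mpr
      ((List.singleton_infix_iff '#' line.toList).mpr hc)] at h'
    simp at h'
  rw [pvA_eq_canon line m hmem, pvAlt_eq_canon line m]

-- ===== VERDICT (by name: the statement is the Claim_ definition above) =====
theorem take_ngrams_spec : Claim_equal_take_ngrams := by
  intro line m _ hpre
  unfold Spec_take_ngrams
  exact pv_main line m hpre
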